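-- pv_equiv track=rewrite | github.com/poushwell/orchesis | src/orchesis/scanner.py | _arg_has_shell_metacharacter
-- ===== SOURCE A (Python) =====
-- def _arg_has_shell_metacharacter(text: str) -> bool:
--     if not text:
--         return False
--     if "&&" in text or "||" in text:
--         return True
--     if "|" in text or ";" in text:
--         return True
--     if "$(" in text or "`" in text:
--         return True
--     if ">>" in text:
--         return True
--     i = 0
--     while True:
--         j = text.find(">", i)
--         if j == -1:
--             break
--         left = text[j - 1] if j > 0 else ""
--         right = text[j + 1] if j + 1 < len(text) else ""
--         if left not in "<=-|" and right != "=":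
--             return True
--         i = j + 1
--     return False
-- ===== SOURCE B (Python) =====
-- def _arg_has_shell_metacharacter(text: str) -> bool:
--     # Single sliding-window pass (prev, cur, nxt) instead of repeated substring scans.
--     prev = None
--     chars = list(text)
--     for cur, nxt in zip(chars, chars[1:] + [None]):
--         if cur in "|;`":
--             return True
--         if cur == "&" and nxt == "&":
--             return True
--         if cur == "$" and nxt == "(":
--             return True
--         if cur == ">" and (nxt == ">" or (prev is not None and prev not in "<=-|" and nxt != "=")):
--             return True
--         prev = cur
--     return False
-- ===== Notes on version B (the rewrite author's own statement) =====
-- stated objective: alternative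
-- what changed: Replaced the seven repeated substring scans plus a find-driven while loop over redirect positions with one left-to-right sliding-window pass over (prev, cur, next) character triples that decides every metacharacter rule locally.
import Mathlib
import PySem

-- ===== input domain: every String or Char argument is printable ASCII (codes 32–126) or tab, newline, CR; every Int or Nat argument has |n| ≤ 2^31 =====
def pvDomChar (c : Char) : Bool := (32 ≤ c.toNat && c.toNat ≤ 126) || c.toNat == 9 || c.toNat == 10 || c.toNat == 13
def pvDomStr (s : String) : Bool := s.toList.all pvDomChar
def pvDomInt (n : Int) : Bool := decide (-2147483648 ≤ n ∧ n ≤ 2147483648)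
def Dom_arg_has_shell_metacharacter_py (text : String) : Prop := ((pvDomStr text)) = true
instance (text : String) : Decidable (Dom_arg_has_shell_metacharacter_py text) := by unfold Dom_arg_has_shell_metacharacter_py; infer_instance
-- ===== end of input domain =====

-- B replaces A's repeated substring scans plus find-driven redirect loop by one sliding-window
-- (prev, cur, next) pass over the characters; objective: alternative single-pass formulation.


-- ===== PORT A =====
-- A's while loop over successive text.find(">", i) positions; the fuel only makes the same
-- computation total (started with fuel = length + 1, more than the Python loop can iterate).
def pvLoopA (s : List Char) : Nat → Nat → Bool
  | 0, _ => false
  | fuel+1, i =>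
    let j := PySem.Chars.findFrom s ['>'] (i : Int) none
    if j = -1 then false
    else
      let jn := j.toNat
      -- Python: left in "<=-|" (left = "" when j = 0, and "" in "<=-|" is True)
      let leftIn : Bool :=
        if 0 < jn then
          match s[jn-1]? with
          | some c => c == '<' || c == '=' || c == '-' || c == '|'
          | none => true   -- unreachable: 0 < jn ≤ length
        else true
      -- Python: right != "=" (right = "" when j + 1 ≥ len(text))
      let rightNe : Bool :=
        match s[jn+1]? with
        | some c => c != '='
        | none => true
      if !leftIn && rightNe then true
      else pvLoopA s fuel (jn+1)

def arg_has_shell_metacharacter_py (text : String) : Bool :=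
  let s := text.toList
  if s = [] then false
  else if PySem.Chars.isIn ['&','&'] s || PySem.Chars.isIn ['|','|'] s then true
  else if PySem.Chars.isIn ['|'] s || PySem.Chars.isIn [';'] s then true
  else if PySem.Chars.isIn ['$','('] s || PySem.Chars.isIn ['`'] s then true
  else if PySem.Chars.isIn ['>','>'] s then true
  else pvLoopA s (s.length + 1) 0

-- ===== PORT B =====
-- sliding window: prev is the previous character (none before the first), nxt the next one
def pvScanB : Option Char → List Char → Bool
  | _, [] => false
  | prev, c :: rest =>
    let nxt := rest.head?
    if c == '|' || c == ';' || c == '`' then true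
    else if c == '&' && nxt == some '&' then true
    else if c == '$' && nxt == some '(' then true
    else if c == '>' && (nxt == some '>' ||
        (prev.isSome && !(prev == some '<' || prev == some '=' || prev == some '-' || prev == some '|')
          && nxt != some '=')) then true
    else pvScanB (some c) rest

def arg_has_shell_metacharacter_py_alt (text : String) : Bool :=
  pvScanB none text.toList

-- ===== PRECONDITION & SPEC =====
def Spec_arg_has_shell_metacharacter_py (text : String) (out : Bool) : Prop := out = arg_has_shell_metacharacter_py_alt text
instance (text : String) (out : Bool) : Decidable (Spec_arg_has_shell_metacharacter_py text out) := by unfold Spec_arg_has_shell_metacharacter_py; infer_instance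

-- ===== CLAIM (what is proved, stated in full; the proofs are below) =====
def Claim_equal_arg_has_shell_metacharacter_py : Prop := ∀ (text : String), Dom_arg_has_shell_metacharacter_py text → Spec_arg_has_shell_metacharacter_py text (arg_has_shell_metacharacter_py text)

-- ===== LEMMAS AND PROOFS =====

-- the '>'-at-position-j condition of A's while loop
def pvGt (s : List Char) (j : Nat) : Prop :=
  s[j]? = some '>' ∧ 0 < j ∧ s[j-1]? ≠ some '<' ∧ s[j-1]? ≠ some '=' ∧
    s[j-1]? ≠ some '-' ∧ s[j-1]? ≠ some '|' ∧ s[j+1]? ≠ some '='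

-- a position j of s carrying a shell metacharacter (the common characterisation)
def pvTrig (s : List Char) (j : Nat) : Prop :=
  s[j]? = some '|' ∨ s[j]? = some ';' ∨ s[j]? = some '`'
  ∨ (s[j]? = some '&' ∧ s[j+1]? = some '&')
  ∨ (s[j]? = some '$' ∧ s[j+1]? = some '(')
  ∨ (s[j]? = some '>' ∧ s[j+1]? = some '>')
  ∨ pvGt s j

lemma pvPrefix_one (a : Char) (t : List Char) : [a] <+: t ↔ t[0]? = some a := by
  cases t with
  | nil => simp
  | cons b t => simp [List.cons_prefix_cons, eq_comm]

lemma pvPrefix_two (a b : Char) (t : List Char) :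
    [a,b] <+: t ↔ t[0]? = some a ∧ t[1]? = some b := by
  cases t with
  | nil => simp
  | cons c t =>
    cases t with
    | nil => simp [List.cons_prefix_cons]
    | cons d t => simp [List.cons_prefix_cons, eq_comm]

lemma pvIsIn_one (a : Char) (s : List Char) :
    PySem.Chars.isIn [a] s = true ↔ ∃ j : Nat, s[j]? = some a := by
  rw [← PySem.Chars.exists_prefix_drop_iff_isIn]
  simp only [pvPrefix_one, List.getElem?_drop, Nat.add_zero]

lemma pvIsIn_two (a b : Char) (s : List Char) :
    PySem.Chars.isIn [a,b] s = true ↔ ∃ j : Nat, s[j]? = some a ∧ s[j+1]? = some b := by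
  rw [← PySem.Chars.exists_prefix_drop_iff_isIn]
  simp only [pvPrefix_two, List.getElem?_drop, Nat.add_zero]

-- A's '>' loop finds a position ≥ i satisfying pvGt
lemma pvLoopA_iff (s : List Char) (fuel : Nat) :
    ∀ i, i ≤ s.length → s.length + 1 ≤ fuel + i →
      (pvLoopA s fuel i = true ↔ ∃ j, i ≤ j ∧ pvGt s j) := by
  induction fuel with
  | zero => intro i hi hf; omega
  | succ fuel IH =>
    intro i hi hf
    simp only [pvLoopA]
    by_cases hneg : PySem.Chars.findFrom s ['>'] (i : Int) none = -1
    · rw [if_pos hneg]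
      have hno := (PySem.Chars.findFrom_natCast_eq_neg_one_iff s ['>'] i hi).mp hneg
      constructor
      · intro h; exact absurd h (by simp)
      · rintro ⟨j, hij, hj⟩
        exfalso
        apply hno
        rw [← PySem.Chars.isIn_iff_infix, ← PySem.Chars.exists_prefix_drop_iff_isIn]
        refine ⟨j - i, ?_⟩
        rw [List.drop_drop]
        simp only [pvPrefix_one, List.getElem?_drop, Nat.add_zero]
        have : i + (j - i) = j := by omega
        rw [this]
        exact hj.1
    · rw [if_neg hneg]
      obtain ⟨hle, hpre, hmin⟩ := PySem.Chars.findFrom_natCast_spec s ['>'] i hi hneg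
      set j := PySem.Chars.findFrom s ['>'] (i : Int) none with hjdef
      set jn := j.toNat with hjndef
      have hchar : s[jn]? = some '>' := by
        simp only [pvPrefix_one, List.getElem?_drop, Nat.add_zero] at hpre
        exact hpre
      have hjlen : jn < s.length := (List.getElem?_eq_some_iff.mp hchar).1
      have hij : i ≤ jn := by omega
      -- the two boolean tests, in propositional form
      have hleft : (if 0 < jn then
            (match s[jn-1]? with
             | some c => c == '<' || c == '=' || c == '-' || c == '|'
             | none => true)
          else true) = false ↔
          (0 < jn ∧ s[jn-1]? ≠ some '<' ∧ s[jn-1]? ≠ some '=' ∧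
            s[jn-1]? ≠ some '-' ∧ s[jn-1]? ≠ some '|') := by
        by_cases hp : 0 < jn
        · rw [if_pos hp]
          have hlt : jn - 1 < s.length := by omega
          have hsome : s[jn-1]? = some (s[jn-1]'hlt) := List.getElem?_eq_getElem hlt
          rw [hsome]
          simp [hp]
          tauto
        · simp [hp]
      have hright : (match s[jn+1]? with
            | some c => c != '='
            | none => true) = true ↔ s[jn+1]? ≠ some '=' := by
        cases hx : s[jn+1]? with
        | none => simp
        | some c => simp
      by_cases hc : (!(if 0 < jn then
            (match s[jn-1]? with
             | some c => c == '<' || c == '=' || c == '-' || c == '|'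
             | none => true)
          else true) && (match s[jn+1]? with
            | some c => c != '='
            | none => true)) = true
      · rw [if_pos hc]
        simp only [Bool.and_eq_true, Bool.not_eq_true'] at hc
        refine ⟨fun _ => ⟨jn, hij, hchar, ?_⟩, fun _ => rfl⟩
        have hl := hleft.mp hc.1
        have hr := hright.mp hc.2
        exact ⟨hl.1, hl.2.1, hl.2.2.1, hl.2.2.2.1, hl.2.2.2.2, hr⟩
      · rw [if_neg hc]
        rw [IH (jn+1) (by omega) (by omega)]
        -- no pvGt position in [i, jn]
        have hnot : ∀ k, i ≤ k → k ≤ jn → ¬ pvGt s k := by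
          intro k h1 h2 hg
          rcases Nat.lt_or_ge k jn with hlt | hge
          · refine hmin k h1 hlt ?_
            simp only [pvPrefix_one, List.getElem?_drop, Nat.add_zero]
            exact hg.1
          · have hkj : k = jn := by omega
            subst hkj
            simp only [Bool.and_eq_true, Bool.not_eq_true', not_and_or] at hc
            obtain ⟨_, hp, h1', h2', h3', h4', h5'⟩ := hg
            rcases hc with hcl | hcr
            · have : (if 0 < jn then
                  (match s[jn-1]? with
                   | some c => c == '<' || c == '=' || c == '-' || c == '|'
                   | none => true)
                else true) = false := hleft.mpr ⟨hp, h1', h2', h3', h4'⟩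
              · exact hcl this
            · exact hcr (hright.mpr h5')
        constructor
        · rintro ⟨k, hk, hg⟩; exact ⟨k, by omega, hg⟩
        · rintro ⟨k, hk, hg⟩
          refine ⟨k, ?_, hg⟩
          by_contra hlt
          exact hnot k hk (by omega) hg
  
-- B's scan from position i (prev = character i-1, if any) finds a pvTrig position ≥ i
lemma pvScanB_drop (s : List Char) :
    ∀ n i p, s.length - i ≤ n → p = (if i = 0 then none else s[i-1]?) →
      (pvScanB p (s.drop i) = true ↔ ∃ j, i ≤ j ∧ pvTrig s j) := by
  intro n
  induction n with
  | zero =>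
    intro i p hn hp
    have hlen : s.length ≤ i := by omega
    rw [List.drop_eq_nil_of_le hlen]
    simp only [pvScanB]
    constructor
    · intro h; exact absurd h (by simp)
    · rintro ⟨j, hj, ht⟩
      exfalso
      have hnone : s[j]? = none := List.getElem?_eq_none (by omega)
      simp only [pvTrig, pvGt, hnone] at ht
      tauto
  | succ n IH =>
    intro i p hn hp
    by_cases hlen : s.length ≤ i
    · rw [List.drop_eq_nil_of_le hlen]
      simp only [pvScanB]
      constructor
      · intro h; exact absurd h (by simp)
      · rintro ⟨j, hj, ht⟩
        exfalso
        have hnone : s[j]? = none := List.getElem?_eq_none (by omega)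
        simp only [pvTrig, pvGt, hnone] at ht
        tauto
    · replace hlen : i < s.length := Nat.lt_of_not_le hlen
      have hdrop : s.drop i = s[i]'hlen :: s.drop (i+1) := (List.getElem_cons_drop hlen).symm
      rw [hdrop]
      simp only [pvScanB, List.head?_drop]
      have hcur : s[i]? = some (s[i]'hlen) := List.getElem?_eq_getElem hlen
      set c := s[i]'hlen with hcdef
      -- reduce each boolean test to a proposition
      by_cases h1 : (c == '|' || c == ';' || c == '`') = true
      · rw [if_pos h1]
        simp only [Bool.or_eq_true, beq_iff_eq] at h1
        refine ⟨fun _ => ⟨i, le_refl i, ?_⟩, fun _ => rfl⟩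
        rcases h1 with (h | h) | h
        · exact Or.inl (by rw [hcur, h])
        · exact Or.inr (Or.inl (by rw [hcur, h]))
        · exact Or.inr (Or.inr (Or.inl (by rw [hcur, h])))
      · rw [if_neg h1]
        by_cases h2 : (c == '&' && s[i+1]? == some '&') = true
        · rw [if_pos h2]
          simp only [Bool.and_eq_true, beq_iff_eq] at h2
          exact ⟨fun _ => ⟨i, le_refl i, Or.inr (Or.inr (Or.inr (Or.inl ⟨by rw [hcur, h2.1], h2.2⟩)))⟩,
            fun _ => rfl⟩
        · rw [if_neg h2]
          by_cases h3 : (c == '$' && s[i+1]? == some '(') = true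
          · rw [if_pos h3]
            simp only [Bool.and_eq_true, beq_iff_eq] at h3
            exact ⟨fun _ => ⟨i, le_refl i,
              Or.inr (Or.inr (Or.inr (Or.inr (Or.inl ⟨by rw [hcur, h3.1], h3.2⟩))))⟩, fun _ => rfl⟩
          · rw [if_neg h3]
            by_cases h4 : (c == '>' && (s[i+1]? == some '>' ||
                (p.isSome && !(p == some '<' || p == some '=' || p == some '-' || p == some '|')
                  && s[i+1]? != some '='))) = true
            · rw [if_pos h4]
              simp only [Bool.and_eq_true, Bool.or_eq_true, beq_iff_eq] at h4
              refine ⟨fun _ => ⟨i, le_refl i, ?_⟩, fun _ => rfl⟩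
              rcases h4.2 with hgt | ⟨⟨hps, hpn⟩, hne⟩
              · exact Or.inr (Or.inr (Or.inr (Or.inr (Or.inr (Or.inl ⟨by rw [hcur, h4.1], hgt⟩)))))
              · -- pvGt case
                have hi0 : i ≠ 0 := by
                  intro h0; rw [hp, if_pos h0] at hps; simp at hps
                rw [hp, if_neg hi0] at hpn
                simp only [Bool.not_eq_true', Bool.or_eq_false_iff, beq_eq_false_iff_ne] at hpn
                refine Or.inr (Or.inr (Or.inr (Or.inr (Or.inr (Or.inr
                  ⟨by rw [hcur, h4.1], by omega, hpn.1.1.1, hpn.1.1.2, hpn.1.2, hpn.2, ?_⟩)))))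
                simpa using hne
            · rw [if_neg h4]
              rw [IH (i+1) (some c) (by omega) (by simp [hcur])]
              -- position i itself does not trigger
              have hti : ¬ pvTrig s i := by
                have hcc : ∀ d, s[i]? = some d → c = d := by
                  intro d hd; rw [hcur] at hd; exact Option.some.inj hd
                intro ht
                rcases ht with h | h | h | ⟨ha, hb⟩ | ⟨ha, hb⟩ | ⟨ha, hb⟩ | hg
                · exact h1 (by simp [hcc _ h])
                · exact h1 (by simp [hcc _ h])
                · exact h1 (by simp [hcc _ h])
                · exact h2 (by simp [hcc _ ha, hb])
                · exact h3 (by simp [hcc _ ha, hb])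
                · exact h4 (by simp [hcc _ ha, hb])
                · obtain ⟨ha, hp0, hl1, hl2, hl3, hl4, hr⟩ := hg
                  apply h4
                  have hi0 : i ≠ 0 := by omega
                  have hlt2 : i - 1 < s.length := by omega
                  have hsm : s[i-1]? = some (s[i-1]'hlt2) := List.getElem?_eq_getElem hlt2
                  have hd1 : s[i-1]'hlt2 ≠ '<' := by intro e; exact hl1 (by rw [hsm, e])
                  have hd2 : s[i-1]'hlt2 ≠ '=' := by intro e; exact hl2 (by rw [hsm, e])
                  have hd3 : s[i-1]'hlt2 ≠ '-' := by intro e; exact hl3 (by rw [hsm, e])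
                  have hd4 : s[i-1]'hlt2 ≠ '|' := by intro e; exact hl4 (by rw [hsm, e])
                  simp [hcc _ ha, hp, hi0, hsm, hd1, hd2, hd3, hd4, hr, bne_iff_ne]
              constructor
              · rintro ⟨k, hk, hg⟩; exact ⟨k, by omega, hg⟩
              · rintro ⟨k, hk, hg⟩
                refine ⟨k, ?_, hg⟩
                rcases Nat.lt_or_ge k (i+1) with hlt | hge
                · have : k = i := by omega
                  exact absurd (this ▸ hg) hti
                · exact hge

-- A returns true exactly when some position triggers
lemma pvA_iff (text : String) :
    arg_has_shell_metacharacter_py text = true ↔ ∃ j, pvTrig text.toList j := by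
  simp only [arg_has_shell_metacharacter_py]
  generalize text.toList = s
  by_cases h0 : s = []
  · rw [if_pos h0]
    subst h0
    constructor
    · intro h; exact absurd h (by simp)
    · rintro ⟨j, ht⟩
      exfalso
      simp only [pvTrig, pvGt, List.getElem?_nil] at ht
      tauto
  · rw [if_neg h0]
    by_cases h1 : (PySem.Chars.isIn ['&','&'] s || PySem.Chars.isIn ['|','|'] s) = true
    · rw [if_pos h1]
      simp only [Bool.or_eq_true] at h1
      refine ⟨fun _ => ?_, fun _ => rfl⟩
      rcases h1 with h | h
      · obtain ⟨j, hj⟩ := (pvIsIn_two _ _ _).mp h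
        exact ⟨j, Or.inr (Or.inr (Or.inr (Or.inl hj)))⟩
      · obtain ⟨j, hj⟩ := (pvIsIn_two _ _ _).mp h
        exact ⟨j, Or.inl hj.1⟩
    · rw [if_neg h1]
      by_cases h2 : (PySem.Chars.isIn ['|'] s || PySem.Chars.isIn [';'] s) = true
      · rw [if_pos h2]
        simp only [Bool.or_eq_true] at h2
        refine ⟨fun _ => ?_, fun _ => rfl⟩
        rcases h2 with h | h
        · obtain ⟨j, hj⟩ := (pvIsIn_one _ _).mp h
          exact ⟨j, Or.inl hj⟩
        · obtain ⟨j, hj⟩ := (pvIsIn_one _ _).mp h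
          exact ⟨j, Or.inr (Or.inl hj)⟩
      · rw [if_neg h2]
        by_cases h3 : (PySem.Chars.isIn ['$','('] s || PySem.Chars.isIn ['`'] s) = true
        · rw [if_pos h3]
          simp only [Bool.or_eq_true] at h3
          refine ⟨fun _ => ?_, fun _ => rfl⟩
          rcases h3 with h | h
          · obtain ⟨j, hj⟩ := (pvIsIn_two _ _ _).mp h
            exact ⟨j, Or.inr (Or.inr (Or.inr (Or.inr (Or.inl hj))))⟩
          · obtain ⟨j, hj⟩ := (pvIsIn_one _ _).mp h
            exact ⟨j, Or.inr (Or.inr (Or.inl hj))⟩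
        · rw [if_neg h3]
          by_cases h4 : PySem.Chars.isIn ['>','>'] s = true
          · rw [if_pos h4]
            refine ⟨fun _ => ?_, fun _ => rfl⟩
            obtain ⟨j, hj⟩ := (pvIsIn_two _ _ _).mp h4
            exact ⟨j, Or.inr (Or.inr (Or.inr (Or.inr (Or.inr (Or.inl hj)))))⟩
          · rw [if_neg h4]
            rw [pvLoopA_iff s (s.length + 1) 0 (by omega) (by omega)]
            simp only [Bool.or_eq_true, not_or] at h1 h2 h3
            constructor
            · rintro ⟨j, _, hg⟩
              exact ⟨j, Or.inr (Or.inr (Or.inr (Or.inr (Or.inr (Or.inr hg)))))⟩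
            · rintro ⟨j, ht⟩
              rcases ht with h | h | h | h | h | h | h
              · exact absurd ((pvIsIn_one _ _).mpr ⟨j, h⟩) h2.1
              · exact absurd ((pvIsIn_one _ _).mpr ⟨j, h⟩) h2.2
              · exact absurd ((pvIsIn_one _ _).mpr ⟨j, h⟩) h3.2
              · exact absurd ((pvIsIn_two _ _ _).mpr ⟨j, h⟩) h1.1
              · exact absurd ((pvIsIn_two _ _ _).mpr ⟨j, h⟩) h3.1
              · exact absurd ((pvIsIn_two _ _ _).mpr ⟨j, h⟩) h4
              · exact ⟨j, Nat.zero_le j, h⟩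

lemma pvB_iff (text : String) :
    arg_has_shell_metacharacter_py_alt text = true ↔ ∃ j, pvTrig text.toList j := by
  unfold arg_has_shell_metacharacter_py_alt
  have := pvScanB_drop text.toList text.toList.length 0 none (by omega) (by simp)
  rw [List.drop_zero] at this
  rw [this]
  simp

-- ===== VERDICT (by name: the statement is the Claim_ definition above) =====
theorem arg_has_shell_metacharacter_py_spec : Claim_equal_arg_has_shell_metacharacter_py := by
  intro text _
  unfold Spec_arg_has_shell_metacharacter_py
  rw [Bool.eq_iff_iff, pvA_iff, pvB_iff]
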